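-- pv_equiv track=rewrite | github.com/marcopodda/graphgen-redux | datasets/preprocess_dataset.py | get_unique_symbols
-- ===== SOURCE A (Python) =====
-- def get_unique_symbols(reduced_dfs_codes):
--     reduced_forward, reduced_backward, count = {}, {}, 0
--
--     symbols = []
--     for reduced_dfs_code in reduced_dfs_codes:
--         symbols = [e[2] for e in reduced_dfs_code]
--         for sym in symbols:
--             if sym not in reduced_backward:
--                 reduced_backward[sym] = count
--                 reduced_forward[count] = sym
--                 count += 1
--
--     return reduced_forward, reduced_backward
-- ===== SOURCE B (Python) =====
-- def get_unique_symbols(reduced_dfs_codes):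
--     flat = [e[2] for code in reduced_dfs_codes for e in code]
--     firsts = sorted(set(flat), key=flat.index)
--     reduced_backward = {s: i for i, s in enumerate(firsts)}
--     reduced_forward = {i: s for s, i in reduced_backward.items()}
--     return reduced_forward, reduced_backward
-- ===== Notes on version B (the rewrite author's own statement) =====
-- stated objective: alternative
-- what changed: Instead of one streaming pass growing two dicts under a membership guard, B flattens all symbols, deduplicates with an unordered set(), recovers first-appearance order by SORTING the set on flat.index, builds the backward dict by enumeration and the forward dict by inverting backward.
import Mathlib
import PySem

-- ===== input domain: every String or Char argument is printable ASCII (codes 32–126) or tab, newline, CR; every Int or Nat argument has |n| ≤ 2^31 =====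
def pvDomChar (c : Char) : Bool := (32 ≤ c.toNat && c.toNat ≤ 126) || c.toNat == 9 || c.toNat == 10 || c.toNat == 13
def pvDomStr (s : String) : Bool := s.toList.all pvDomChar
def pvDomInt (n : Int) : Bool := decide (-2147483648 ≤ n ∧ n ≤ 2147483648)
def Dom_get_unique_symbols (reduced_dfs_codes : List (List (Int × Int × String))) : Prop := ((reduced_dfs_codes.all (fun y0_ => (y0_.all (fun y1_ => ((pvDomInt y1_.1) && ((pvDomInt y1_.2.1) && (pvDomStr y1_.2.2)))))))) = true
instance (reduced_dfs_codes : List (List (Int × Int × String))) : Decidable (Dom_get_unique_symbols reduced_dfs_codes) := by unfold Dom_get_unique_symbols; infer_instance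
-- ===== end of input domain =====

-- B replaces A's streaming pass (two dicts grown under a membership guard) by a dedup-then-sort
-- strategy: flatten, set()-dedup, reorder by first-occurrence index with a sort, then build
-- backward by enumeration and forward by inverting backward; same result, no speed claim.

-- ===== PORT A =====
-- A's loop body: if sym not in reduced_backward, insert into both dicts and bump count.
def get_unique_symbols (reduced_dfs_codes : List (List (Int × Int × String))) :
    (List (Int × String)) × (List (String × Int)) :=
  let st :=
    reduced_dfs_codes.foldl
      (fun (st : PySem.Dict Int String × PySem.Dict String Int × Int) reduced_dfs_code =>
        let symbols := reduced_dfs_code.map (fun e => e.2.2)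
        symbols.foldl
          (fun st sym =>
            if st.2.1.contains sym then st
            else (st.1.insert st.2.2 sym, st.2.1.insert sym st.2.2, st.2.2 + 1))
          st)
      (PySem.Dict.empty, PySem.Dict.empty, 0)
  (st.1.items, st.2.1.items)

-- ===== PORT B =====
-- Source B, line for line. set(flat) is PySem.Set.ofList; flat.index(s) is index?, total form getD 0
-- (exact: every member of the set is in flat, so index? is some; the key is injective on the set —
-- distinct first-occurrence positions — so the sort result is independent of the set's hash order).
-- Each dict comprehension runs over distinct keys, so its dict's items are exactly that pair list.
def get_unique_symbols_alt (reduced_dfs_codes : List (List (Int × Int × String))) :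
    (List (Int × String)) × (List (String × Int)) :=
  let flat := reduced_dfs_codes.flatMap (fun code => code.map (fun e => e.2.2))
  let firsts := PySem.List.sorted (PySem.Set.ofList flat) (fun s => (PySem.List.index? flat s).getD 0)
  let reduced_backward := PySem.Dict.mk ((PySem.List.enumerate firsts).map (fun p => (p.2, p.1)))
  let reduced_forward := PySem.Dict.mk (reduced_backward.items.map (fun p => (p.2, p.1)))
  (reduced_forward.items, reduced_backward.items)

-- ===== PRECONDITION & SPEC =====
def Spec_get_unique_symbols (reduced_dfs_codes : List (List (Int × Int × String))) (out : (List (Int × String)) × (List (String × Int))) : Prop := out = get_unique_symbols_alt reduced_dfs_codes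
instance (reduced_dfs_codes : List (List (Int × Int × String))) (out : (List (Int × String)) × (List (String × Int))) : Decidable (Spec_get_unique_symbols reduced_dfs_codes out) := by unfold Spec_get_unique_symbols; infer_instance

-- ===== CLAIM (what is proved, stated in full; the proofs are below) =====
def Claim_equal_get_unique_symbols : Prop := ∀ (reduced_dfs_codes : List (List (Int × Int × String))), Dom_get_unique_symbols reduced_dfs_codes → Spec_get_unique_symbols reduced_dfs_codes (get_unique_symbols reduced_dfs_codes)

-- ===== LEMMAS AND PROOFS =====

-- the state of A's loop after the first-occurrence symbols `seen` have been processed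
def pvStateOf (seen : List String) : PySem.Dict Int String × PySem.Dict String Int × Int :=
  (PySem.Dict.mk (PySem.List.enumerate seen),
   PySem.Dict.mk ((PySem.List.enumerate seen).map (fun p => (p.2, p.1))),
   (seen.length : Int))

lemma pvStep (xs : List String) (seen : List String) (hnd : seen.Nodup) :
    xs.foldl
      (fun (st : PySem.Dict Int String × PySem.Dict String Int × Int) sym =>
        if st.2.1.contains sym then st
        else (st.1.insert st.2.2 sym, st.2.1.insert sym st.2.2, st.2.2 + 1))
      (pvStateOf seen)
    = pvStateOf (PySem.Set.update seen xs) := by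
  induction xs generalizing seen with
  | nil => rfl
  | cons x xs ih =>
    simp only [List.foldl_cons]
    have hcont : (pvStateOf seen).2.1.contains x = decide (x ∈ seen) := by
      simp [pvStateOf, PySem.Dict.contains_eq_decide_mem_keys, PySem.Dict.keys_mk,
        List.map_map, Function.comp_def, PySem.List.map_snd_enumerate]
    have hupd : PySem.Set.update seen (x :: xs) = PySem.Set.update (PySem.Set.add seen x) xs := rfl
    by_cases hx : x ∈ seen
    · rw [hcont]
      simp only [hx, decide_true, if_true]
      have hadd : PySem.Set.add seen x = seen := by
        simp [PySem.Set.add, PySem.Set.contains, hx]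
      rw [hupd, hadd, ih seen hnd]
    · rw [hcont]
      simp only [hx, decide_false, Bool.false_eq_true, if_false]
      have hadd : PySem.Set.add seen x = seen ++ [x] := by
        simp [PySem.Set.add, PySem.Set.contains, hx]
      have hfresh_fwd : (pvStateOf seen).1.contains ((seen.length : Int)) = false := by
        simp only [pvStateOf, PySem.Dict.contains_eq_decide_mem_keys, PySem.Dict.keys_mk,
          PySem.List.map_fst_enumerate, decide_eq_false_iff_not]
        intro hmem
        rw [PySem.List.mem_pyRange_one] at hmem
        omega
      have hfresh_bwd : (pvStateOf seen).2.1.contains x = false := by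
        rw [hcont]; simp [hx]
      have hstep : ((pvStateOf seen).1.insert (pvStateOf seen).2.2 x,
            (pvStateOf seen).2.1.insert x (pvStateOf seen).2.2,
            (pvStateOf seen).2.2 + 1) = pvStateOf (seen ++ [x]) := by
      -- each dict gains a fresh key, so its items list just appends one pair
        refine Prod.ext ?_ (Prod.ext ?_ ?_)
        · apply PySem.Dict.ext
          rw [show (pvStateOf seen).2.2 = (seen.length : Int) from rfl,
            PySem.Dict.items_insert_of_not_contains _ _ hfresh_fwd]
          simp [pvStateOf, PySem.List.enumerate_append, PySem.List.enumerate]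
        · apply PySem.Dict.ext
          rw [show (pvStateOf seen).2.2 = (seen.length : Int) from rfl,
            PySem.Dict.items_insert_of_not_contains _ _ hfresh_bwd]
          simp [pvStateOf, PySem.List.enumerate_append, PySem.List.enumerate]
        · simp [pvStateOf]
      rw [hstep, hupd, hadd, ih (seen ++ [x]) (by simp [List.nodup_append, hnd]; exact fun a ha he => hx (he ▸ ha))]

-- the first-occurrence index is strictly increasing along set(xs)'s insertion order,
-- so sorting by it is the identity on that list
lemma pvKeyMono (xs : List String) :
    (PySem.Set.ofList xs).Pairwise
      (fun a b => (PySem.List.index? xs a).getD 0 < (PySem.List.index? xs b).getD 0) := by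
  induction xs with
  | nil => simp [PySem.Set.ofList]
  | cons x xs ih =>
    rw [PySem.Set.ofList_cons]
    constructor
    · intro b hb
      obtain ⟨hb', hbx⟩ := (PySem.Set.mem_discard _ _ _).1 hb
      have hbxs : b ∈ xs := (PySem.Set.mem_ofList _ _).1 hb'
      obtain ⟨k, hk⟩ := Option.isSome_iff_exists.1 ((PySem.List.index?_isSome_iff xs b).2 hbxs)
      rw [PySem.List.index?_cons_self, PySem.List.index?_cons_of_ne _ (Ne.symm hbx), hk]
      simp
    · have hsub : ((PySem.Set.ofList xs).discard x).Sublist (PySem.Set.ofList xs) :=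
        List.filter_sublist
      refine List.Pairwise.imp_of_mem ?_ (ih.sublist hsub)
      intro a b ha hb hab
      obtain ⟨ha', hax⟩ := (PySem.Set.mem_discard _ _ _).1 ha
      obtain ⟨hb', hbx⟩ := (PySem.Set.mem_discard _ _ _).1 hb
      obtain ⟨j, hj⟩ := Option.isSome_iff_exists.1
        ((PySem.List.index?_isSome_iff xs a).2 ((PySem.Set.mem_ofList _ _).1 ha'))
      obtain ⟨k, hk⟩ := Option.isSome_iff_exists.1
        ((PySem.List.index?_isSome_iff xs b).2 ((PySem.Set.mem_ofList _ _).1 hb'))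
      rw [PySem.List.index?_cons_of_ne _ (Ne.symm hax), PySem.List.index?_cons_of_ne _ (Ne.symm hbx),
        hj, hk]
      rw [hj, hk] at hab
      simpa using hab

-- ===== VERDICT (by name: the statement is the Claim_ definition above) =====
theorem get_unique_symbols_spec : Claim_equal_get_unique_symbols := by
  intro rdc _
  show get_unique_symbols rdc = get_unique_symbols_alt rdc
  unfold get_unique_symbols get_unique_symbols_alt
  have hflat :
      rdc.foldl
        (fun (st : PySem.Dict Int String × PySem.Dict String Int × Int) code =>
          (code.map (fun e => e.2.2)).foldl
            (fun st sym =>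
              if st.2.1.contains sym then st
              else (st.1.insert st.2.2 sym, st.2.1.insert sym st.2.2, st.2.2 + 1))
            st)
        (PySem.Dict.empty, PySem.Dict.empty, 0)
      = (rdc.flatMap (fun code => code.map (fun e => e.2.2))).foldl
          (fun st sym =>
            if st.2.1.contains sym then st
            else (st.1.insert st.2.2 sym, st.2.1.insert sym st.2.2, st.2.2 + 1))
          (PySem.Dict.empty, PySem.Dict.empty, 0) := by
    rw [List.flatMap_def, List.foldl_flatten, List.foldl_map]
  simp only []
  rw [hflat]
  have hinit : ((PySem.Dict.empty, PySem.Dict.empty, 0) :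
      PySem.Dict Int String × PySem.Dict String Int × Int) = pvStateOf [] := rfl
  set flat := rdc.flatMap (fun code => code.map (fun e => e.2.2)) with hflatdef
  rw [hinit, pvStep flat [] List.nodup_nil]
  have hupd : PySem.Set.update ([] : List String) flat = PySem.Set.ofList flat := rfl
  have hsorted : PySem.List.sorted (PySem.Set.ofList flat)
      (fun s => (PySem.List.index? flat s).getD 0) = PySem.Set.ofList flat :=
    PySem.List.sorted_eq_self_of_pairwise _ _ ((pvKeyMono flat).imp (fun h => le_of_lt h))
  rw [hupd, hsorted]
  -- both dicts in B have distinct keys, so their items are the literal pair lists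
  simp [pvStateOf, List.map_map, Function.comp_def]
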